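-- pv_equiv track=rewrite | github.com/BilgeKaganOzkan/DI725_ASSIGNMENT_1 | data_preprocessing/data_explorer.py | extract_customer_text
-- ===== SOURCE A (Python) =====
-- def extract_customer_text(conversation):
--     """Extract only customer parts from the conversation."""
--     if not isinstance(conversation, str):
--         return ""
--
--     lines = conversation.split('\n')
--     customer_lines = []
--     is_customer = False
--
--     for line in lines:
--         line = line.strip()
--         if not line:
--             continue
--
--         if line.startswith('Customer:'):
--             is_customer = True
--             # Remove "Customer:" label
--             customer_text = line[9:].strip()
--             if customer_text:  # If line is not empty
--                 customer_lines.append(customer_text)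
--         elif line.startswith('Agent:'):
--             is_customer = False
--         elif is_customer and line:  # If still customer talking and line is not empty
--             customer_lines.append(line)
--
--     return ' '.join(customer_lines)
-- ===== SOURCE B (Python) =====
-- def extract_customer_text(conversation):
--     """Extract only customer parts from the conversation."""
--     if not isinstance(conversation, str):
--         return ""
--     lines = [s for s in map(str.strip, conversation.split('\n')) if s]
--     return ' '.join(_customer_pieces(lines))
--
--
-- def _split_turn(lines):
--     """Split off the continuation lines before the next speaker label."""
--     i = 0
--     while i < len(lines) and not (lines[i].startswith('Customer:') or lines[i].startswith('Agent:')):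
--         i += 1
--     return lines[:i], lines[i:]
--
--
-- def _customer_pieces(lines):
--     """Recursively collect the text pieces of every customer turn."""
--     if not lines:
--         return []
--     head, rest = lines[0], lines[1:]
--     if head.startswith('Customer:'):
--         body, after = _split_turn(rest)
--         t = head[9:].strip()
--         return ([t] if t else []) + body + _customer_pieces(after)
--     return _customer_pieces(rest)
-- ===== Notes on version B (the rewrite author's own statement) =====
-- stated objective: alternative
-- what changed: Replaces A's per-line is_customer flag loop with a recursive partition of the stripped non-empty lines into speaker turns (split off each turn's continuation lines up to the next label, keep customer turns, flatten).
import Mathlib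
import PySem

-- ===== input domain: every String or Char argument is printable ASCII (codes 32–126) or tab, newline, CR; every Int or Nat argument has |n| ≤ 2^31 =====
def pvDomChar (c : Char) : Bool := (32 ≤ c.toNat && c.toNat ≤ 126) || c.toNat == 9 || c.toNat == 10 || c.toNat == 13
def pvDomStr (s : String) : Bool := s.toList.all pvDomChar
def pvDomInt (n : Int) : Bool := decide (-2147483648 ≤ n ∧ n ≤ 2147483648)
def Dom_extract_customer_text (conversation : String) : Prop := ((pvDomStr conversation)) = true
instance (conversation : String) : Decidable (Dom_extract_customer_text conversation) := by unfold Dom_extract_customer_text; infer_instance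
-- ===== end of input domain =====

-- B replaces A's per-line speaker flag by a recursive partition of the stripped
-- non-empty lines into speaker turns (objective: alternative decomposition, same cost).

-- ===== PORT A =====
-- loop body of A on an already-stripped line (the Python strips first, then branches)
def pvCore (st : List String × Bool) (line : String) : List String × Bool :=
  if line = "" then st
  else if PySem.Str.startswith line "Customer:" then
    let customer_text := PySem.Str.strip (PySem.Str.slice line (some 9) none)
    if customer_text ≠ "" then (st.1 ++ [customer_text], true) else (st.1, true)
  else if PySem.Str.startswith line "Agent:" then (st.1, false)
  else if st.2 = true ∧ line ≠ "" then (st.1 ++ [line], st.2)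
  else st

def extract_customer_text (conversation : String) : String :=
  let lines := match PySem.Str.split? conversation "\n" with
    | some ls => ls
    | none => []   -- unreachable: the separator "\n" is non-empty
  let res := List.foldl (fun st line => pvCore st (PySem.Str.strip line)) ([], false) lines
  PySem.Str.join " " res.1

-- ===== PORT B =====
def pvIsLabel (l : String) : Bool :=
  PySem.Str.startswith l "Customer:" || PySem.Str.startswith l "Agent:"

-- B's _split_turn (while loop ported as structural recursion)
def pvSplitTurn : List String → List String × List String
  | [] => ([], [])
  | l :: ls =>
    if pvIsLabel l then ([], l :: ls)
    else
      let p := pvSplitTurn ls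
      (l :: p.1, p.2)

-- needed by pvPieces's termination proof
theorem pvSplitTurn_snd_len (ls : List String) : (pvSplitTurn ls).2.length ≤ ls.length := by
  induction ls with
  | nil => simp [pvSplitTurn]
  | cons l ls ih =>
    simp only [pvSplitTurn]
    split
    · simp
    · simpa using Nat.le_succ_of_le ih

-- B's _customer_pieces
def pvPieces : List String → List String
  | [] => []
  | l :: ls =>
    if PySem.Str.startswith l "Customer:" then
      let p := pvSplitTurn ls
      let t := PySem.Str.strip (PySem.Str.slice l (some 9) none)
      (if t ≠ "" then [t] else []) ++ p.1 ++ pvPieces p.2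
    else pvPieces ls
termination_by ls => ls.length
decreasing_by
  · have := pvSplitTurn_snd_len ls; simp; omega
  · simp

def extract_customer_text_alt (conversation : String) : String :=
  let lines0 := match PySem.Str.split? conversation "\n" with
    | some ls => ls
    | none => []   -- unreachable: the separator "\n" is non-empty
  let lines := (lines0.map PySem.Str.strip).filter (fun s => s ≠ "")
  PySem.Str.join " " (pvPieces lines)

-- ===== PRECONDITION & SPEC =====
def Spec_extract_customer_text (conversation : String) (out : String) : Prop := out = extract_customer_text_alt conversation
instance (conversation : String) (out : String) : Decidable (Spec_extract_customer_text conversation out) := by unfold Spec_extract_customer_text; infer_instance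

-- ===== CLAIM (what is proved, stated in full; the proofs are below) =====
def Claim_equal_extract_customer_text : Prop := ∀ (conversation : String), Dom_extract_customer_text conversation → Spec_extract_customer_text conversation (extract_customer_text conversation)

-- ===== LEMMAS AND PROOFS =====

-- stripping/empty-skipping inside A's loop = pre-filtering the stripped lines
theorem pv_fold_filter (lines : List String) (st : List String × Bool) :
    List.foldl (fun st line => pvCore st (PySem.Str.strip line)) st lines
      = List.foldl pvCore st ((lines.map PySem.Str.strip).filter (fun s => s ≠ "")) := by
  induction lines generalizing st with
  | nil => rfl
  | cons l ls ih =>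
    simp only [List.foldl_cons, List.map_cons, List.filter_cons]
    by_cases h : PySem.Str.strip l = ""
    · rw [show pvCore st (PySem.Str.strip l) = st by simp [pvCore, h]]
      simp [h, ih]
    · simp [h, ih]

-- the flag-loop on nonempty lines computes exactly B's turn partition
theorem pv_fold_pieces (L : List String) (h : ∀ l ∈ L, l ≠ "") (acc : List String) (b : Bool) :
    (List.foldl pvCore (acc, b) L).1
      = acc ++ (if b then (pvSplitTurn L).1 ++ pvPieces (pvSplitTurn L).2 else pvPieces L) := by
  induction L generalizing acc b with
  | nil => cases b <;> simp [pvSplitTurn, pvPieces]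
  | cons l ls ih =>
    have hl : l ≠ "" := h l (List.mem_cons_self ..)
    have ihh := ih (fun x hx => h x (List.mem_cons_of_mem _ hx))
    by_cases hc : PySem.Str.startswith l "Customer:" = true
    · -- Customer label: both sides start a new customer turn
      by_cases ht : PySem.Str.strip (PySem.Str.slice l (some 9) none) = ""
      · simp at hc
        cases b <;>
          simp [pvCore, hl, hc, ht, pvSplitTurn, pvIsLabel, pvPieces, ihh]
      · simp at hc
        cases b <;>
          simp [pvCore, hl, hc, ht, pvSplitTurn, pvIsLabel, pvPieces, ihh, List.append_assoc]
    · by_cases ha : PySem.Str.startswith l "Agent:" = true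
      · -- Agent label: A drops the flag; B skips the line
        simp at hc ha
        cases b <;>
          simp [pvCore, hl, hc, ha, pvSplitTurn, pvIsLabel, pvPieces, ihh]
      · -- plain line: A appends it iff the flag is set; B keeps it in the current turn body
        simp at hc ha
        cases b <;>
          simp [pvCore, hl, hc, ha, pvSplitTurn, pvIsLabel, pvPieces, ihh, List.append_assoc]

-- ===== VERDICT (by name: the statement is the Claim_ definition above) =====
theorem extract_customer_text_spec : Claim_equal_extract_customer_text := by
  intro conversation _
  show extract_customer_text conversation = extract_customer_text_alt conversation
  simp only [extract_customer_text, extract_customer_text_alt]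
  rw [pv_fold_filter]
  rw [pv_fold_pieces _ (fun l hl => by simpa using (List.mem_filter.1 hl).2) [] false]
  simp
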